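-- pv_equiv track=rewrite | github.com/AngJianHwee/LeetCode | CodeForces/Codeforces Round #636 (Div. 3) - C. Alternating Subsequence.py | startWith
-- ===== SOURCE A (Python) =====
-- def startWith(arr, sign):
-- 	count = 0
-- 	i = 0
-- 	while i < len(arr):
-- 		if arr[i]*sign > 0:
-- 			count += 1
-- 			sign = -1*sign
-- 		i += 1
-- 	return count
-- ===== SOURCE B (Python) =====
-- def startWith(arr, sign):
--     # Compress the input into its alternating run-sign sequence, then count
--     # positionally from the first run matching the (normalized) starting sign.
--     signs = [1 if x > 0 else -1 for x in arr if x != 0]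
--     runs = []
--     prev = None
--     for s in signs:
--         if s != prev:
--             runs.append(s)
--             prev = s
--     target = 1 if sign > 0 else (-1 if sign < 0 else 0)
--     if target == 0:
--         return 0
--     try:
--         return len(runs) - runs.index(target)
--     except ValueError:
--         return 0
-- ===== Notes on version B (the rewrite author's own statement) =====
-- stated objective: alternative
-- what changed: Replaces the fused greedy sign-flipping loop with a compress-then-count shape: drop zeros, map to +/-1 signs, collapse consecutive equal signs into the alternating run sequence, then the answer is the number of runs from the first run matching the normalized starting sign.
import Mathlib
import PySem

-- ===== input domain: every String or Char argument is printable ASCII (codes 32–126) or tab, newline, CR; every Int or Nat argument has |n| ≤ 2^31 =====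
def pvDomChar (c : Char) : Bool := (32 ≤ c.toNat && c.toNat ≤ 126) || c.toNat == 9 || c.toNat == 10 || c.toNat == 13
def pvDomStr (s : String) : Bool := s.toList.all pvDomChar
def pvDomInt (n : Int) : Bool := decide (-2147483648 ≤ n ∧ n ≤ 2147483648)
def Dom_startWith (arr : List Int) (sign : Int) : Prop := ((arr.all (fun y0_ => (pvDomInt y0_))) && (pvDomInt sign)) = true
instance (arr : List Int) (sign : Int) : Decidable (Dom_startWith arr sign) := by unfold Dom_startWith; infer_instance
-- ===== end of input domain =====

-- B replaces A's fused greedy sign-flipping loop by compress-to-runs then positional count; alternative decomposition, same cost.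


-- ===== PORT A =====
-- A's while loop: walk the list, count a hit when arr[i]*sign > 0 and flip sign.
def loopA : List Int → Int → Int → Int
  | [], _, count => count
  | x :: xs, s, count => if x * s > 0 then loopA xs (-1 * s) (count + 1) else loopA xs s count

def startWith (arr : List Int) (sign : Int) : Int := loopA arr sign 0

-- ===== PORT B =====
-- the list comprehension: drop zeros, map to +1/-1
def signsOf (arr : List Int) : List Int :=
  (arr.filter (fun x => x ≠ 0)).map (fun x => if x > 0 then (1 : Int) else -1)

-- the for-loop over `signs` with state `prev`, appending to `runs` (built head-first)
def runsL : List Int → Option Int → List Int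
  | [], _ => []
  | s :: rest, prev => if some s ≠ prev then s :: runsL rest (some s) else runsL rest prev

def startWith_alt (arr : List Int) (sign : Int) : Int :=
  let runs := runsL (signsOf arr) none
  let target : Int := if sign > 0 then 1 else if sign < 0 then -1 else 0
  if target = 0 then 0
  else
    match PySem.List.index? runs target with
    | some i => (runs.length : Int) - i
    | none => 0

-- ===== PRECONDITION & SPEC =====
def Spec_startWith (arr : List Int) (sign : Int) (out : Int) : Prop := out = startWith_alt arr sign
instance (arr : List Int) (sign : Int) (out : Int) : Decidable (Spec_startWith arr sign out) := by unfold Spec_startWith; infer_instance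

-- ===== CLAIM (what is proved, stated in full; the proofs are below) =====
def Claim_equal_startWith : Prop := ∀ (arr : List Int) (sign : Int), Dom_startWith arr sign → Spec_startWith arr sign (startWith arr sign)

-- ===== LEMMAS AND PROOFS =====

-- greedy counter over the compressed sign list (proof intermediate)
def hCnt : List Int → Int → Int
  | [], _ => 0
  | x :: xs, t => if x = t then 1 + hCnt xs (-t) else hCnt xs t

-- "length of the suffix starting at the first occurrence of t" (proof intermediate)
def fCnt : List Int → Int → Int
  | [], _ => 0
  | a :: l, t => if a = t then (l.length : Int) + 1 else fCnt l t

def PM (a : Int) : Prop := a = 1 ∨ a = -1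

lemma pm_signsOf (arr : List Int) : ∀ a ∈ signsOf arr, PM a := by
  intro a ha
  simp only [signsOf, List.mem_map] at ha
  obtain ⟨x, -, hx⟩ := ha
  by_cases h : x > 0 <;> simp [h] at hx <;> [exact Or.inl hx.symm; exact Or.inr hx.symm]

lemma pm_runsL : ∀ (l : List Int) (p : Option Int), (∀ a ∈ l, PM a) → ∀ a ∈ runsL l p, PM a := by
  intro l
  induction l with
  | nil => intro p _ a ha; simp [runsL] at ha
  | cons x xs ih =>
    intro p hpm a ha
    simp only [runsL] at ha
    split at ha
    · rcases List.mem_cons.mp ha with h | h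
      · exact h ▸ hpm x (by simp)
      · exact ih (some x) (fun b hb => hpm b (by simp [hb])) a h
    · exact ih p (fun b hb => hpm b (by simp [hb])) a ha

lemma chain_runsL : ∀ (l : List Int) (p : Option Int),
    List.IsChain (· ≠ ·) (runsL l p) ∧ (∀ c, p = some c → (runsL l p).head? ≠ some c) := by
  intro l
  induction l with
  | nil => intro p; exact ⟨List.IsChain.nil, by simp [runsL]⟩
  | cons x xs ih =>
    intro p
    simp only [runsL]
    split
    · rename_i hne
      obtain ⟨hc, hh⟩ := ih (some x)
      refine ⟨List.isChain_cons.mpr ⟨?_, hc⟩, ?_⟩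
      · intro y hy he
        apply hh x rfl
        rw [← he] at hy
        exact Option.mem_def.mp hy
      · intro c hp hhead
        simp only [List.head?_cons, Option.some.injEq] at hhead
        exact hne (by rw [hhead, hp])
    · exact ih p

-- unfolding a runsL step from the initial (no previous element) state
lemma runsL_cons_none (x : Int) (xs : List Int) :
    runsL (x :: xs) none = x :: runsL xs (some x) := by simp [runsL]

-- carrying prev = some c just merges a leading run of c into the previous run
lemma runsL_some (xs : List Int) (c : Int) :
    runsL xs (some c) = if (runsL xs none).head? = some c then (runsL xs none).tail else runsL xs none := by
  cases xs with
  | nil => simp [runsL]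
  | cons y ys =>
    by_cases h : y = c
    · subst h
      simp [runsL]
    · simp [runsL, h]

-- on an adjacent-distinct ±1 list headed by t, the count for -t is length - 1
lemma falt (r : List Int) (hpm : ∀ a ∈ r, PM a) (hch : List.IsChain (· ≠ ·) r)
    (t : Int) (ht : PM t) (hh : r.head? = some t) : fCnt r (-t) = (r.length : Int) - 1 := by
  cases r with
  | nil => simp at hh
  | cons a rs =>
    simp only [List.head?_cons, Option.some.injEq] at hh
    subst hh
    have hane : a ≠ -a := by rcases ht with h | h <;> subst h <;> decide
    cases rs with
    | nil => simp [fCnt, hane]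
    | cons b rs' =>
      have hab : a ≠ b := (List.isChain_cons.mp hch).1 b rfl
      have hb : PM b := hpm b (by simp)
      have hba : b = -a := by rcases ht with h | h <;> rcases hb with h2 | h2 <;> omega
      simp only [fCnt, if_neg hane, if_pos hba, List.length_cons]
      push_cast
      omega

lemma hCnt_cons_eq (x : Int) (xs : List Int) : hCnt (x :: xs) x = 1 + hCnt xs (-x) := by
  simp [hCnt]

lemma hCnt_cons_ne (x t : Int) (xs : List Int) (h : x ≠ t) : hCnt (x :: xs) t = hCnt xs t := by
  simp [hCnt, h]

lemma fCnt_cons_eq (x : Int) (l : List Int) : fCnt (x :: l) x = (l.length : Int) + 1 := by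
  simp [fCnt]

lemma fCnt_cons_ne (x t : Int) (l : List Int) (h : x ≠ t) : fCnt (x :: l) t = fCnt l t := by
  simp [fCnt, h]

-- greedy on the sign list = positional count on the run list
lemma h_eq_f (l : List Int) (hpm : ∀ a ∈ l, PM a) :
    ∀ t, PM t → hCnt l t = fCnt (runsL l none) t := by
  induction l with
  | nil => intro t _; simp [hCnt, runsL, fCnt]
  | cons x xs ih =>
    intro t ht
    have hpmxs : ∀ a ∈ xs, PM a := fun a ha => hpm a (by simp [ha])
    have hx : PM x := hpm x (by simp)
    have ihx := ih hpmxs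
    have hpmr : ∀ a ∈ runsL xs none, PM a := pm_runsL xs none hpmxs
    have hchr : List.IsChain (· ≠ ·) (runsL xs none) := (chain_runsL xs none).1
    rw [runsL_cons_none, runsL_some]
    by_cases hxt : x = t
    · subst hxt
      have hmt : PM (-x) := by rcases hx with h | h <;> subst h <;> simp [PM]
      have key := ihx (-x) hmt
      rw [hCnt_cons_eq, fCnt_cons_eq, key]
      by_cases hh : (runsL xs none).head? = some x
      · obtain ⟨rs, hr⟩ : ∃ rs, runsL xs none = x :: rs := by
          cases hrr : runsL xs none with
          | nil => rw [hrr] at hh; simp at hh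
          | cons a rs =>
            rw [hrr] at hh
            simp only [List.head?_cons, Option.some.injEq] at hh
            exact ⟨rs, by rw [hh]⟩
        have hf := falt (x :: rs) (hr ▸ hpmr) (hr ▸ hchr) x hx (by simp)
        rw [hr, hf, if_pos (show ((x :: rs).head? = some x) by simp), List.tail_cons]
        simp only [List.length_cons]
        push_cast
        omega
      · rw [if_neg hh]
        cases hrr : runsL xs none with
        | nil => simp [fCnt]
        | cons a rs =>
          have ha : PM a := hpmr a (by rw [hrr]; simp)
          have hane : a ≠ x := by
            intro he
            exact hh (by simp [hrr, he])
          have hax : a = -x := by rcases hx with h | h <;> rcases ha with h2 | h2 <;> omega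
          rw [hax, fCnt_cons_eq]
          simp only [List.length_cons]
          push_cast
          omega
    · have key := ihx t ht
      rw [hCnt_cons_ne x t xs hxt, fCnt_cons_ne x t _ hxt, key]
      by_cases hh : (runsL xs none).head? = some x
      · obtain ⟨rs, hr⟩ : ∃ rs, runsL xs none = x :: rs := by
          cases hrr : runsL xs none with
          | nil => rw [hrr] at hh; simp at hh
          | cons a rs =>
            rw [hrr] at hh
            simp only [List.head?_cons, Option.some.injEq] at hh
            exact ⟨rs, by rw [hh]⟩
        rw [hr, if_pos (show ((x :: rs).head? = some x) by simp), List.tail_cons,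
          fCnt_cons_ne x t rs hxt]
      · rw [if_neg hh]

-- index?-based positional count = fCnt
lemma index_eq_f (r : List Int) (t : Int) :
    (match PySem.List.index? r t with
     | some i => (r.length : Int) - i
     | none => 0) = fCnt r t := by
  induction r with
  | nil =>
    simp [PySem.List.index?_eq_idxOf?, List.idxOf?, fCnt]
  | cons a l ih =>
    by_cases h : a = t
    · subst h
      rw [PySem.List.index?_cons_self]
      simp [fCnt]
    · rw [PySem.List.index?_cons_of_ne l h]
      simp only [fCnt, if_neg h]
      rw [← ih]
      cases hi : PySem.List.index? l t with
      | none => simp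
      | some i =>
        show ((a :: l).length : Int) - (↑(i + 1) : Nat) = (l.length : Int) - i
        simp only [List.length_cons]
        push_cast
        omega

-- A's loop = greedy over the compressed sign list (state split by the sign of s)
lemma loopA_eq (arr : List Int) : ∀ (s c : Int),
    (0 < s → loopA arr s c = c + hCnt (signsOf arr) 1) ∧
    (s < 0 → loopA arr s c = c + hCnt (signsOf arr) (-1)) ∧
    (s = 0 → loopA arr s c = c) := by
  induction arr with
  | nil => intro s c; simp [loopA, signsOf, hCnt]
  | cons x xs ih =>
    intro s c
    refine ⟨?_, ?_, ?_⟩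
    · intro hs
      by_cases hx0 : x = 0
      · subst hx0
        simp only [loopA, zero_mul, lt_irrefl, if_false]
        rw [(ih s c).1 hs]
        simp [signsOf]
      · by_cases hxp : x > 0
        · have hpos : x * s > 0 := mul_pos hxp hs
          simp only [loopA, if_pos hpos]
          rw [((ih (-1 * s) (c + 1)).2.1) (by linarith)]
          have hs1 : signsOf (x :: xs) = 1 :: signsOf xs := by simp [signsOf, hx0, hxp]
          rw [hs1]; simp [hCnt]; ring
        · have hxn : x < 0 := lt_of_le_of_ne (not_lt.mp hxp) hx0
          have hneg : ¬ (x * s > 0) := by nlinarith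
          simp only [loopA, if_neg hneg]
          rw [(ih s c).1 hs]
          have hs1 : signsOf (x :: xs) = (-1) :: signsOf xs := by simp [signsOf, hx0, hxp]
          rw [hs1]; simp [hCnt]
    · intro hs
      by_cases hx0 : x = 0
      · subst hx0
        simp only [loopA, zero_mul, lt_irrefl, if_false]
        rw [(ih s c).2.1 hs]
        simp [signsOf]
      · by_cases hxp : x > 0
        · have hneg : ¬ (x * s > 0) := by nlinarith
          simp only [loopA, if_neg hneg]
          rw [(ih s c).2.1 hs]
          have hs1 : signsOf (x :: xs) = 1 :: signsOf xs := by simp [signsOf, hx0, hxp]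
          rw [hs1]; simp [hCnt]
        · have hxn : x < 0 := lt_of_le_of_ne (not_lt.mp hxp) hx0
          have hpos : x * s > 0 := mul_pos_of_neg_of_neg hxn hs
          simp only [loopA, if_pos hpos]
          rw [((ih (-1 * s) (c + 1)).1) (by linarith)]
          have hs1 : signsOf (x :: xs) = (-1) :: signsOf xs := by simp [signsOf, hx0, hxp]
          rw [hs1]; simp [hCnt]; ring
    · intro hs
      subst hs
      simp only [loopA, mul_zero, lt_irrefl, if_false]
      exact (ih 0 c).2.2 rfl

-- ===== VERDICT (by name: the statement is the Claim_ definition above) =====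
theorem startWith_spec : Claim_equal_startWith := by
  intro arr sign _
  unfold Spec_startWith startWith startWith_alt
  have hpm := pm_signsOf arr
  rcases lt_trichotomy sign 0 with hs | hs | hs
  · have hnp : ¬ sign > 0 := by linarith
    simp only [hnp, if_false, if_pos hs]
    rw [(loopA_eq arr sign 0).2.1 hs, h_eq_f (signsOf arr) hpm (-1) (Or.inr rfl), ← index_eq_f]
    norm_num
  · subst hs
    simp only [lt_irrefl, if_false]
    exact (loopA_eq arr 0 0).2.2 rfl
  · simp only [hs]
    rw [(loopA_eq arr sign 0).1 hs, h_eq_f (signsOf arr) hpm 1 (Or.inl rfl), ← index_eq_f]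
    norm_num
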